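-- pv_equiv track=rewrite | github.com/RickLee910/Leetcode_easy | String_easy/leetcode_1370.py | sortString1
-- ===== SOURCE A (Python) =====
-- def sortString1(s: str) -> str:
--     h = [0] * 26
--     for ch in s:
--         h[ord(ch) - 97] += 1
--
--     def appendChar(ret, p):
--         if h[p] > 0:
--             h[p] -= 1
--             ret.append(chr(p + 97))
--
--     def haveChar():
--         return any(h[i] > 0 for i in range(26))
--
--     ret = list()
--     while True:
--         if not haveChar():
--             break
--         for i in range(26):
--             appendChar(ret, i)
--         for i in range(26):
--             appendChar(ret, 25 - i)
--     return "".join(ret)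
-- ===== SOURCE B (Python) =====
-- def sortString1(s: str) -> str:
--     h = [0] * 26
--     for ch in s:
--         h[ord(ch) - 97] += 1
--     out = []
--     for p in range(max(h)):
--         idxs = [i for i in range(26) if h[i] > p]
--         out.extend(idxs if p % 2 == 0 else reversed(idxs))
--     return "".join(chr(i + 97) for i in out)
-- ===== Notes on version B (the rewrite author's own statement) =====
-- stated objective: simpler
-- what changed: B keeps the counting line but replaces A's mutating while-loop (decrement each positive slot, rescan all 26 slots with any() until every count hits zero) with a read-only pass-indexed formulation: for each pass p below max(h) it filters the indices with h[i] > p, ascending for even p and reversed for odd p, so no count is mutated and no have-char rescan exists.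
import Mathlib
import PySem

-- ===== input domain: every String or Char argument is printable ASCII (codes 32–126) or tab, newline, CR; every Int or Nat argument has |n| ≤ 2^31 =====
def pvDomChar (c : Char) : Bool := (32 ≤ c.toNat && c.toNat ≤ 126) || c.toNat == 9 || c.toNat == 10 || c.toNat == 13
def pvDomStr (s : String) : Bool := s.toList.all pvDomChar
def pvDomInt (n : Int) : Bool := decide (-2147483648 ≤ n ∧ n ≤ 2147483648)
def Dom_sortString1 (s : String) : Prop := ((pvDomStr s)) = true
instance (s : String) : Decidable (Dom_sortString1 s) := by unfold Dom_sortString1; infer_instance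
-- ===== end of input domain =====

-- B replaces A's mutate-decrement-and-rescan while-loop by pass-indexed filters over the
-- immutable count array (a letter with count f appears in passes 0..f-1); objective: simpler.


-- ===== PORT A =====
-- Both Pythons build h with the identical line: h = [0]*26; for ch in s: h[ord(ch)-97] += 1.
-- Python's negative-index wrap h[-k] = h[26-k] is modelled by emod 26; this is exact for
-- chars with 71 ≤ ord ≤ 122 (= Pre_); outside that range Python raises IndexError.
def chIdx (c : Char) : Nat := (((c.toNat : Int) - 97).emod 26).toNat

def countH (s : String) : List Nat :=
  s.toList.foldl (fun h c => h.set (chIdx c) (h[chIdx c]! + 1)) (List.replicate 26 0)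

def chrOf (i : Nat) : Char := Char.ofNat (i + 97)

-- appendChar(ret, p): if h[p] > 0: h[p] -= 1; ret.append(chr(p + 97))
def stepIdx (st : List Nat × List Char) (i : Nat) : List Nat × List Char :=
  if st.1[i]! > 0 then (st.1.set i (st.1[i]! - 1), st.2 ++ [chrOf i]) else st

-- the while-True loop; fuel = total count (each round with haveChar consumes ≥ 1)
def loopA : Nat → List Nat × List Char → List Char
  | 0, st => st.2
  | fuel+1, st =>
    if (List.range 26).any (fun i => st.1[i]! > 0) then
      let st1 := (List.range 26).foldl stepIdx st
      let st2 := (List.range 26).foldl (fun st i => stepIdx st (25 - i)) st1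
      loopA fuel st2
    else st.2

def sortString1 (s : String) : String :=
  let h := countH s
  String.ofList (loopA h.sum (h, []))

-- ===== PORT B =====
def sortString1_alt (s : String) : String :=
  let h := countH s
  let out := (List.range (h.foldl Nat.max 0)).flatMap (fun p =>
    let idxs := (List.range 26).filter (fun i => h[i]! > p)
    if p % 2 == 0 then idxs else idxs.reverse)
  String.ofList (out.map chrOf)

-- ===== PRECONDITION & SPEC =====
-- Pre_ excludes exactly the strings on which the shared counting line raises IndexError
-- (a char whose code is outside [71,122]); both A and B raise there.
def Pre_sortString1 (s : String) : Prop := s.toList.all (fun c => 71 ≤ c.toNat && c.toNat ≤ 122) = true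
instance (s : String) : Decidable (Pre_sortString1 s) := by unfold Pre_sortString1; infer_instance
def pvWitness_sortString1 : String := "cba`G"

def Spec_sortString1 (s : String) (out : String) : Prop := out = sortString1_alt s
instance (s : String) (out : String) : Decidable (Spec_sortString1 s out) := by unfold Spec_sortString1; infer_instance

-- ===== CLAIM (what is proved, stated in full; the proofs are below) =====
def Claim_equal_sortString1 : Prop := ∀ (s : String), Dom_sortString1 s → Pre_sortString1 s → Spec_sortString1 s (sortString1 s)

-- ===== LEMMAS AND PROOFS =====

-- proof-side abbreviations
def maxH (h : List Nat) : Nat := h.foldl Nat.max 0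
def decList (h : List Nat) (l : List Nat) : List Nat :=
  h.mapIdx (fun j x => if j ∈ l then x - 1 else x)
def emitIdx (h : List Nat) : List Nat :=
  (List.range (maxH h)).flatMap (fun p =>
    let idxs := (List.range 26).filter (fun i => h[i]! > p)
    if p % 2 == 0 then idxs else idxs.reverse)

-- helper getElem! bridge
lemma getBang_eq (l : List Nat) (i : Nat) (h : i < l.length) : l[i]! = l[i] := by
  simp [List.getElem!_eq_getElem?_getD, List.getElem?_eq_getElem h]

lemma max_sub_sub (a y k : Nat) : Nat.max (a - k) (y - k) = Nat.max a y - k := by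
  simp only [Nat.max_def]; split_ifs <;> omega

lemma stepIdx_eq (h : List Nat) (ret : List Char) (i : Nat) (hi : i < h.length) :
    stepIdx (h, ret) i =
      (h.set i (h[i]! - 1), ret ++ (if h[i]! > 0 then [chrOf i] else [])) := by
  have hbang : h[i]! = h[i] := getBang_eq h i hi
  by_cases hp : 0 < h[i]
  · simp [stepIdx, hbang, hp]
  · have h0 : h[i] = 0 := by omega
    simp only [stepIdx, hbang, h0, gt_iff_lt, lt_irrefl, if_false]
    rw [show (0 : Nat) - 1 = 0 from rfl, ← h0, List.set_getElem_self]
    simp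

lemma decList_nil (h : List Nat) : decList h [] = h := by
  apply List.ext_getElem <;> simp [decList]

lemma decList_cons (h : List Nat) (i : Nat) (l : List Nat) (hi : i < h.length) (hnotin : i ∉ l) :
    decList (h.set i (h[i]! - 1)) l = decList h (i :: l) := by
  apply List.ext_getElem
  · simp [decList]
  intro j hj1 hj2
  have hjlen : j < h.length := by simpa [decList] using hj2
  simp only [decList, List.getElem_mapIdx]
  by_cases hji : j = i
  · subst hji
    simp [hnotin, List.getElem_set_self, getBang_eq h j hjlen]
  · rw [List.getElem_set_ne (by omega)]
    simp [List.mem_cons, hji]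

lemma fold_pass (l : List Nat) (h : List Nat) (ret : List Char)
    (hnd : l.Nodup) (hlt : ∀ i ∈ l, i < h.length) :
    l.foldl stepIdx (h, ret) =
      (decList h l, ret ++ (l.filter (fun i => h[i]! > 0)).map chrOf) := by
  induction l generalizing h ret with
  | nil => simp [decList_nil]
  | cons i l ih =>
    have hi : i < h.length := hlt i (List.mem_cons_self ..)
    have hnotin : i ∉ l := (List.nodup_cons.mp hnd).1
    rw [List.foldl_cons, stepIdx_eq h ret i hi,
        ih _ _ (List.nodup_cons.mp hnd).2
          (fun j hj => by rw [List.length_set]; exact hlt j (List.mem_cons_of_mem _ hj))]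
    rw [Prod.mk.injEq]
    refine ⟨decList_cons h i l hi hnotin, ?_⟩
    rw [List.filter_cons]
    have hfc : l.filter (fun j => (h.set i (h[i]! - 1))[j]! > 0) = l.filter (fun j => h[j]! > 0) := by
      apply List.filter_congr
      intro j hj
      have hjlen : j < h.length := hlt j (List.mem_cons_of_mem _ hj)
      have hji : j ≠ i := fun e => hnotin (e ▸ hj)
      rw [getBang_eq _ j (by simpa using hjlen), getBang_eq h j hjlen,
          List.getElem_set_ne (by omega)]
    rw [hfc]
    by_cases hp : 0 < h[i]?.getD 0 <;> simp [hp]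

lemma foldl_max_ge (l : List Nat) : ∀ a, a ≤ l.foldl Nat.max a ∧ ∀ x ∈ l, x ≤ l.foldl Nat.max a := by
  induction l with
  | nil => simp
  | cons y l ih =>
    intro a
    refine ⟨le_trans (Nat.le_max_left a y) (ih (Nat.max a y)).1, ?_⟩
    intro x hx
    rcases List.mem_cons.mp hx with rfl | hx
    · exact le_trans (Nat.le_max_right a x) (ih (Nat.max a x)).1
    · exact (ih (Nat.max a y)).2 x hx

lemma maxH_eq_zero (h : List Nat) (hz : ∀ x ∈ h, x = 0) : maxH h = 0 := by
  unfold maxH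
  induction h with
  | nil => rfl
  | cons y l ih =>
    have hy := hz y (by simp)
    simp only [List.foldl_cons, hy, Nat.max_eq_left (Nat.zero_le 0)]
    simpa using ih (fun x hx => hz x (by simp [hx]))

lemma maxH_map_sub (h : List Nat) (k : Nat) : maxH (h.map (· - k)) = maxH h - k := by
  unfold maxH
  have : ∀ (l : List Nat) (a : Nat), (l.map (· - k)).foldl Nat.max (a - k) = l.foldl Nat.max a - k := by
    intro l
    induction l with
    | nil => intro a; rfl
    | cons y l ih =>
      intro a
      simp only [List.map_cons, List.foldl_cons]
      rw [max_sub_sub, ih]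
  simpa using this h 0

lemma maxH_le_sum (h : List Nat) : maxH h ≤ h.sum := by
  unfold maxH
  have : ∀ (l : List Nat) (a : Nat), l.foldl Nat.max a ≤ Nat.max a l.sum := by
    intro l
    induction l with
    | nil => simp
    | cons y l ih =>
      intro a
      simp only [List.foldl_cons, List.sum_cons]
      refine le_trans (ih _) (Nat.max_le.mpr ⟨?_, ?_⟩)
      · exact Nat.max_le.mpr ⟨Nat.le_max_left .., le_trans (Nat.le_add_right ..) (Nat.le_max_right ..)⟩
      · exact le_trans (Nat.le_add_left ..) (Nat.le_max_right ..)
  simpa using this h 0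

lemma getBang_map_sub (h : List Nat) (k i : Nat) (hi : i < h.length) :
    (h.map (· - k))[i]! = h[i]! - k := by
  rw [getBang_eq _ i (by simpa), getBang_eq h i hi, List.getElem_map]

lemma maxH_pos_of (h : List Nat) (hlen : h.length = 26)
    (hc : (List.range 26).any (fun i => h[i]! > 0) = true) : 1 ≤ maxH h := by
  rcases List.any_eq_true.mp hc with ⟨i, hi, hp⟩
  simp only [List.mem_range] at hi
  have hi' : i < h.length := by omega
  have h1 : h[i] ≤ maxH h := (foldl_max_ge h 0).2 _ (List.getElem_mem hi')
  rw [getBang_eq h i hi'] at hp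
  simp only [decide_eq_true_eq] at hp
  omega

lemma maxH_zero_of (h : List Nat) (hlen : h.length = 26)
    (hc : ¬ (List.range 26).any (fun i => h[i]! > 0) = true) : maxH h = 0 := by
  apply maxH_eq_zero
  intro x hx
  rcases List.getElem_of_mem hx with ⟨j, hj, rfl⟩
  by_contra hne
  exact hc (List.any_eq_true.mpr ⟨j, List.mem_range.mpr (by omega),
    by rw [getBang_eq h j hj]; simpa using Nat.pos_of_ne_zero hne⟩)

lemma decList_full (h : List Nat) (hlen : h.length = 26) (l : List Nat)
    (hmem : ∀ j, j < 26 → j ∈ l) : decList h l = h.map (· - 1) := by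
  apply List.ext_getElem
  · simp [decList]
  intro j hj1 hj2
  have hj : j < h.length := by simpa [decList] using hj2
  simp only [decList, List.getElem_mapIdx, List.getElem_map]
  rw [if_pos (hmem j (by omega))]

lemma map_sub_sub (h : List Nat) : (h.map (· - 1)).map (· - 1) = h.map (· - 2) := by
  rw [List.map_map]
  exact List.map_congr_left (fun x _ => by simp; omega)

lemma filter_shift (h : List Nat) (hlen : h.length = 26) (p : Nat) :
    (List.range 26).filter (fun i => (h.map (· - 2))[i]! > p)
      = (List.range 26).filter (fun i => h[i]! > p + 2) := by
  apply List.filter_congr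
  intro i hi
  simp only [List.mem_range] at hi
  rw [getBang_map_sub h 2 i (by omega)]
  simp only [decide_eq_decide]
  omega

lemma emit_split (h : List Nat) (hlen : h.length = 26) (hpos : 1 ≤ maxH h) :
    emitIdx h = (List.range 26).filter (fun i => h[i]! > 0)
      ++ ((List.range 26).filter (fun i => h[i]! > 1)).reverse
      ++ emitIdx (h.map (· - 2)) := by
  have hm2 : maxH (h.map (· - 2)) = maxH h - 2 := maxH_map_sub h 2
  by_cases hm1 : maxH h = 1
  · have hF1 : (List.range 26).filter (fun i => h[i]! > 1) = [] := by
      apply List.filter_eq_nil_iff.mpr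
      intro i hi
      simp only [List.mem_range] at hi
      have : h[i] ≤ maxH h := (foldl_max_ge h 0).2 _ (List.getElem_mem (by omega))
      rw [getBang_eq h i (by omega)]
      simpa using by omega
    rw [hF1]
    unfold emitIdx
    rw [hm2, hm1]
    simp
  · have hm : maxH h = 2 + (maxH h - 2) := by omega
    unfold emitIdx
    rw [hm2]
    conv_lhs => rw [hm, List.range_add]
    rw [List.flatMap_append, List.flatMap_map]
    congr 1
    · show (List.flatMap _ [0, 1]) = _
      simp only [List.flatMap_cons, List.flatMap_nil, List.append_nil]
      norm_num
    · congr 1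
      funext p
      rw [filter_shift h hlen p, show 2 + p = p + 2 from by omega]
      simp [Nat.add_mod_right]

lemma main_loop (fuel : Nat) (h : List Nat) (ret : List Char)
    (hlen : h.length = 26) (hfuel : maxH h ≤ 2 * fuel) :
    loopA fuel (h, ret) = ret ++ (emitIdx h).map chrOf := by
  induction fuel generalizing h ret with
  | zero =>
    have hm0 : maxH h = 0 := by omega
    simp [loopA, emitIdx, hm0]
  | succ fuel ih =>
    simp only [loopA]
    by_cases hc : (List.range 26).any (fun i => h[i]! > 0) = true
    · rw [if_pos hc]
      have hmem1 : ∀ i ∈ List.range 26, i < h.length := by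
        intro i hi; simp only [List.mem_range] at hi; omega
      rw [fold_pass (List.range 26) h ret (List.nodup_range) hmem1]
      rw [decList_full h hlen _ (fun j hj => List.mem_range.mpr hj)]
      have e2 : ∀ (st : List Nat × List Char),
          List.foldl (fun st i => stepIdx st (25 - i)) st (List.range 26)
            = List.foldl stepIdx st ((List.range 26).reverse) := by
        intro st
        rw [show (List.range 26).reverse = (List.range 26).map (fun i => 25 - i) by decide,
            List.foldl_map]
      rw [e2, fold_pass _ _ _ (List.nodup_reverse.mpr List.nodup_range)
            (by intro i hi; rw [List.length_map]; exact hmem1 i (List.mem_reverse.mp hi))]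
      rw [decList_full _ (by simpa) _ (fun j hj => List.mem_reverse.mpr (List.mem_range.mpr hj))]
      rw [map_sub_sub]
      rw [ih _ _ (by simpa) (by rw [maxH_map_sub]; omega)]
      rw [emit_split h hlen (maxH_pos_of h hlen hc)]
      have hf1 : (List.range 26).reverse.filter (fun i => (h.map (· - 1))[i]! > 0)
          = ((List.range 26).filter (fun i => h[i]! > 1)).reverse := by
        rw [List.filter_reverse]
        congr 1
        apply List.filter_congr
        intro i hi
        simp only [List.mem_range] at hi
        rw [getBang_map_sub h 1 i (by omega)]
        simp only [decide_eq_decide]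
        omega
      rw [hf1]
      simp [List.append_assoc]
    · rw [if_neg hc]
      have hm0 : maxH h = 0 := maxH_zero_of h hlen hc
      simp [emitIdx, hm0]

lemma countH_length (s : String) : (countH s).length = 26 := by
  unfold countH
  have : ∀ (l : List Char) (h : List Nat), h.length = 26 →
      (l.foldl (fun h c => h.set (chIdx c) (h[chIdx c]! + 1)) h).length = 26 := by
    intro l
    induction l with
    | nil => intro h hh; simpa
    | cons c l ih => intro h hh; exact ih _ (by simpa)
  exact this s.toList _ (by simp)

-- ===== VERDICT (by name: the statement is the Claim_ definition above) =====
theorem sortString1_spec : Claim_equal_sortString1 := by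
  intro s _ _
  unfold Spec_sortString1
  show String.ofList (loopA (countH s).sum (countH s, [])) = sortString1_alt s
  rw [main_loop (countH s).sum (countH s) [] (countH_length s)
        (le_trans (maxH_le_sum (countH s)) (by omega))]
  simp [sortString1_alt, emitIdx, maxH]
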